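-- pv_equiv track=rewrite | github.com/meijerwynand/bt-multimeter-cli | dmm_debugger.py | detect_most_overlap_mode_label
-- ===== SOURCE A (Python) =====
-- def detect_most_overlap_mode_label(active_icons, mode_label_map):
--     best_label = "unknown"
--     max_overlap = 0
--     for label, icons in mode_label_map.items():
--         overlap = len(set(icons) & set(active_icons))
--         if overlap > max_overlap:
--             best_label = label
--             max_overlap = overlap
--     return best_label
-- ===== SOURCE B (Python) =====
-- def detect_most_overlap_mode_label(active_icons, mode_label_map):
--     # Inverted index: icon -> labels whose icon set contains it.
--     index = {}
--     for label, icons in mode_label_map.items():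
--         for icon in set(icons):
--             index.setdefault(icon, []).append(label)
--     # Count, per label, how many distinct active icons hit it.
--     counts = {}
--     for icon in set(active_icons):
--         for label in index.get(icon, []):
--             counts[label] = counts.get(label, 0) + 1
--     # Pick the first label (in map order) with a strictly larger count.
--     best = "unknown"
--     best_count = 0
--     for label in mode_label_map:
--         c = counts.get(label, 0)
--         if c > best_count:
--             best = label
--             best_count = c
--     return best
-- ===== Notes on version B (the rewrite author's own statement) =====
-- stated objective: faster
-- what changed: Replaces the per-label set-intersection scan (which rebuilds set(active_icons) for every label) with an inverted icon->labels index built once, a single counting pass over the distinct active icons, and a final first-strictly-greater selection pass in map order.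
import Mathlib
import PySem

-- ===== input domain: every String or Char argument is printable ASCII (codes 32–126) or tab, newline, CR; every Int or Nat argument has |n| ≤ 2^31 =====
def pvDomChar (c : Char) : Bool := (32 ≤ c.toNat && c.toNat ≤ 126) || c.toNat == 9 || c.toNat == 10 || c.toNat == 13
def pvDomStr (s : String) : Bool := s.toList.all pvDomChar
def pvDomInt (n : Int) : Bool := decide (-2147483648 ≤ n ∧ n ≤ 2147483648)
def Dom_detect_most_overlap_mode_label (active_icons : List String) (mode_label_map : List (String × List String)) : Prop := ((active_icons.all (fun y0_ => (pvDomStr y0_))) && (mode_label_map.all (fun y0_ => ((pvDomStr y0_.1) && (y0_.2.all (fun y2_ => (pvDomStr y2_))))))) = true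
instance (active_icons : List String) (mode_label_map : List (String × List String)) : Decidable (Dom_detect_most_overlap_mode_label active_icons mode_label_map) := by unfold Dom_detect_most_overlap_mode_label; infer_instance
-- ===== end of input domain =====

-- B replaces A's per-label set intersections with an inverted icon→labels index plus one counting pass.

-- ===== PORT A =====
-- A: scan mode_label_map.items(); per label, overlap = len(set(icons) & set(active_icons)); keep first strictly larger.
def detect_most_overlap_mode_label (active_icons : List String) (mode_label_map : List (String × List String)) : String :=
  ((PySem.Dict.ofList mode_label_map).items.foldl
    (fun (st : String × Int) li =>
      let overlap : Int := PySem.Set.len (PySem.Set.inter (PySem.Set.ofList li.2) (PySem.Set.ofList active_icons))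
      if overlap > st.2 then (li.1, overlap) else st)
    ("unknown", 0)).1

-- ===== PORT B =====
-- index.setdefault(icon, []).append(label) over set(icons) of each entry
def dmolIndex (mode_label_map : List (String × List String)) : PySem.Dict String (List String) :=
  (PySem.Dict.ofList mode_label_map).items.foldl
    (fun ix li => (PySem.Set.ofList li.2).foldl
      (fun ix icon => ix.modify icon [] (· ++ [li.1])) ix)
    PySem.Dict.empty

-- counts[label] = counts.get(label, 0) + 1 for each label hit by a distinct active icon
def dmolCounts (active_icons : List String) (ix : PySem.Dict String (List String)) : PySem.Dict String Int :=
  (PySem.Set.ofList active_icons).foldl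
    (fun c icon => (ix.getD icon []).foldl (fun c lab => c.insert lab (c.getD lab 0 + 1)) c)
    PySem.Dict.empty

def detect_most_overlap_mode_label_alt (active_icons : List String) (mode_label_map : List (String × List String)) : String :=
  let counts := dmolCounts active_icons (dmolIndex mode_label_map)
  ((PySem.Dict.ofList mode_label_map).keys.foldl
    (fun (st : String × Int) lab =>
      let c : Int := counts.getD lab 0
      if c > st.2 then (lab, c) else st)
    ("unknown", 0)).1

-- ===== PRECONDITION & SPEC =====
def Spec_detect_most_overlap_mode_label (active_icons : List String) (mode_label_map : List (String × List String)) (out : String) : Prop := out = detect_most_overlap_mode_label_alt active_icons mode_label_map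
instance (active_icons : List String) (mode_label_map : List (String × List String)) (out : String) : Decidable (Spec_detect_most_overlap_mode_label active_icons mode_label_map out) := by unfold Spec_detect_most_overlap_mode_label; infer_instance

-- ===== CLAIM (what is proved, stated in full; the proofs are below) =====
def Claim_equal_detect_most_overlap_mode_label : Prop := ∀ (active_icons : List String) (mode_label_map : List (String × List String)), Dom_detect_most_overlap_mode_label active_icons mode_label_map → Spec_detect_most_overlap_mode_label active_icons mode_label_map (detect_most_overlap_mode_label active_icons mode_label_map)

-- ===== LEMMAS AND PROOFS =====

-- one entry's inner loop appends its label to index[icon] exactly when icon is among its (deduped) icons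
lemma dmol_inner_getD (S : List String) (hS : S.Nodup) (ix : PySem.Dict String (List String)) (lab icon : String) :
    (S.foldl (fun ix x => ix.modify x [] (· ++ [lab])) ix).getD icon []
      = ix.getD icon [] ++ (if icon ∈ S then [lab] else []) := by
  induction S generalizing ix with
  | nil => simp
  | cons x rest ih =>
    rcases List.nodup_cons.mp hS with ⟨hx, hrest⟩
    simp only [List.foldl_cons]
    rw [ih hrest, PySem.Dict.getD_modify]
    by_cases h : icon = x
    · subst h; simp [hx]
    · simp [h, List.mem_cons]

-- index[icon] is the list of first components of the entries whose icon list contains icon, in entry order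
lemma dmol_index_getD (its : List (String × List String)) (ix : PySem.Dict String (List String)) (icon : String) :
    (its.foldl (fun ix li => (PySem.Set.ofList li.2).foldl (fun ix x => ix.modify x [] (· ++ [li.1])) ix) ix).getD icon []
      = ix.getD icon [] ++ ((its.filter (fun li => decide (icon ∈ li.2))).map Prod.fst) := by
  induction its generalizing ix with
  | nil => simp
  | cons li rest ih =>
    simp only [List.foldl_cons, List.filter_cons]
    rw [ih, dmol_inner_getD _ (PySem.Set.nodup_ofList li.2)]
    by_cases h : icon ∈ li.2
    · have hm : icon ∈ PySem.Set.ofList li.2 := (PySem.Set.mem_ofList _ _).mpr h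
      simp [h, hm]
    · have hm : icon ∉ PySem.Set.ofList li.2 := fun hc => h ((PySem.Set.mem_ofList _ _).mp hc)
      simp [h, hm]

-- with distinct first components, counting one label in the filtered firsts is a 0/1 membership test
lemma dmol_count_filter (its : List (String × List String)) (hnd : (its.map Prod.fst).Nodup)
    (lab : String) (ics : List String) (hmem : (lab, ics) ∈ its) (icon : String) :
    ((its.filter (fun li => decide (icon ∈ li.2))).map Prod.fst).count lab
      = if icon ∈ ics then 1 else 0 := by
  induction its with
  | nil => cases hmem
  | cons li rest ih =>
    rw [List.map_cons] at hnd
    rcases List.nodup_cons.mp hnd with ⟨hfst, hrest⟩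
    have hsub : ∀ x, x ∈ (rest.filter (fun li => decide (icon ∈ li.2))).map Prod.fst → x ∈ rest.map Prod.fst := by
      intro x hx
      rcases List.mem_map.mp hx with ⟨q, hq, rfl⟩
      exact List.mem_map_of_mem (List.mem_of_mem_filter hq)
    rcases List.mem_cons.mp hmem with heq | hmem'
    · subst heq
      have hzero : ((rest.filter (fun li => decide (icon ∈ li.2))).map Prod.fst).count lab = 0 :=
        List.count_eq_zero.mpr (fun hm => hfst (hsub lab hm))
      by_cases h : icon ∈ ics
      · simp [h, hzero]
      · simp [h, hzero]
    · have hne : lab ≠ li.1 := by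
        intro h
        exact hfst (h ▸ List.mem_map_of_mem hmem')
      by_cases h : icon ∈ li.2
      · simp only [List.filter_cons, h, decide_true, if_pos, List.map_cons]
        rw [List.count_cons_of_ne (Ne.symm hne)]
        exact ih hrest hmem'
      · simp only [List.filter_cons, h, decide_false]
        exact ih hrest hmem'

-- the nested counting loop adds, per icon, the number of occurrences of the label in that icon's index list
lemma dmol_counts_getD (S : List String) (g : String → List String) (c : PySem.Dict String Int) (lab : String) :
    (S.foldl (fun c icon => (g icon).foldl (fun c l => c.insert l (c.getD l 0 + 1)) c) c).getD lab 0
      = c.getD lab 0 + (S.map (fun icon => ((g icon).count lab : Int))).sum := by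
  induction S generalizing c with
  | nil => simp
  | cons x rest ih =>
    simp only [List.foldl_cons, List.map_cons, List.sum_cons]
    rw [ih, PySem.Dict.getD_foldl_insert_add_one]
    ring

-- |{x ∈ u : x ∈ v}| = |{x ∈ v : x ∈ u}| for duplicate-free lists: both are the card of the finset intersection
lemma dmol_filter_length_comm (u v : List String) (hu : u.Nodup) (hv : v.Nodup) :
    (u.filter (fun x => decide (x ∈ v))).length = (v.filter (fun x => decide (x ∈ u))).length := by
  have key : ∀ (a b : List String), a.Nodup →
      (a.filter (fun x => decide (x ∈ b))).length = (a.toFinset ∩ b.toFinset).card := by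
    intro a b ha
    rw [← List.toFinset_card_of_nodup (ha.filter _), List.toFinset_filter]
    congr 1
    ext x
    simp [Finset.mem_filter, Finset.mem_inter]
  rw [key u v hu, key v u hv, Finset.inter_comm]

-- per entry of the (deduplicated) map: B's count equals A's intersection size
lemma dmol_count_eq_overlap (active_icons : List String) (mode_label_map : List (String × List String))
    (li : String × List String) (hmem : li ∈ (PySem.Dict.ofList mode_label_map).items) :
    (dmolCounts active_icons (dmolIndex mode_label_map)).getD li.1 0
      = PySem.Set.len (PySem.Set.inter (PySem.Set.ofList li.2) (PySem.Set.ofList active_icons)) := by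
  have hnd : ((PySem.Dict.ofList mode_label_map).items.map Prod.fst).Nodup := by
    have h := PySem.Dict.nodup_keys_ofList mode_label_map
    simpa [PySem.Dict.keys] using h
  have hix : ∀ icon, (dmolIndex mode_label_map).getD icon []
      = ((PySem.Dict.ofList mode_label_map).items.filter (fun p => decide (icon ∈ p.2))).map Prod.fst := by
    intro icon
    unfold dmolIndex
    rw [dmol_index_getD]
    simp [PySem.Dict.getD_empty]
  unfold dmolCounts
  rw [dmol_counts_getD _ _ _ li.1]
  have hcount : ∀ icon, (((dmolIndex mode_label_map).getD icon []).count li.1 : Int)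
      = if decide (icon ∈ li.2) = true then (1 : Int) else 0 := by
    intro icon
    rw [hix icon, dmol_count_filter _ hnd li.1 li.2 hmem icon]
    by_cases h : icon ∈ li.2 <;> simp [h]
  rw [List.map_congr_left (fun icon _ => hcount icon)]
  rw [PySem.List.sum_map_ite_one_zero (fun icon => decide (icon ∈ li.2))]
  rw [PySem.Dict.getD_empty, List.countP_eq_length_filter]
  have hfl : (PySem.Set.ofList active_icons).filter (fun x => decide (x ∈ li.2))
      = (PySem.Set.ofList active_icons).filter (fun x => decide (x ∈ PySem.Set.ofList li.2)) := by
    apply List.filter_congr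
    intro x _
    simp only [decide_eq_decide]
    exact (PySem.Set.mem_ofList _ _).symm
  rw [hfl, dmol_filter_length_comm _ _ (PySem.Set.nodup_ofList _) (PySem.Set.nodup_ofList _)]
  have hfr : (PySem.Set.ofList li.2).filter (fun x => decide (x ∈ PySem.Set.ofList active_icons))
      = PySem.Set.inter (PySem.Set.ofList li.2) (PySem.Set.ofList active_icons) := by
    unfold PySem.Set.inter
    apply List.filter_congr
    intro x _
    exact Eq.symm (PySem.Set.contains_eq_decide _ x)
  rw [hfr]
  simp [PySem.Set.len]

-- ===== VERDICT (by name: the statement is the Claim_ definition above) =====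
theorem detect_most_overlap_mode_label_spec : Claim_equal_detect_most_overlap_mode_label := by
  intro active_icons mode_label_map _
  unfold Spec_detect_most_overlap_mode_label
  unfold detect_most_overlap_mode_label detect_most_overlap_mode_label_alt
  simp only [PySem.Dict.keys, List.foldl_map]
  congr 1
  apply PySem.List.foldl_congr_mem
  intro acc li hli
  dsimp only
  rw [← dmol_count_eq_overlap active_icons mode_label_map li hli]
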